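-- pv_equiv track=rewrite | github.com/Lh-Liang/LeetCodePro | 3544.subtree-inversion-sum.py | subtreeInversionSum
-- ===== SOURCE A (Python) =====
-- from typing import List
--
-- def subtreeInversionSum(edges: List[List[int]], nums: List[int], k: int) -> int:
--     n = len(nums)
--     adj = [[] for _ in range(n)]
--     for u, v in edges:
--         adj[u].append(v)
--         adj[v].append(u)
--
--     # Helper function for DFS
--     # Returns a tuple of two lists: (max_sums, min_sums)
--     # max_sums[j] stores the max subtree sum given distance to nearest inverted ancestor is j
--     # min_sums[j] stores the min subtree sum given distance to nearest inverted ancestor is j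
--     # Indices are 1-based for convenience (0 is unused)
--     def dfs(u, p):
--         # Collect results from children first
--         children_results = []
--         for v in adj[u]:
--             if v != p:
--                 children_results.append(dfs(v, u))
--
--         # Current node's value
--         val = nums[u]
--
--         # Arrays to store results for states 1 to k
--         # Initialize with 0, but we will overwrite 1..k
--         curr_maxs = [0] * (k + 1)
--         curr_mins = [0] * (k + 1)
--
--         # 1. Fill states where we CANNOT invert u (distance j < k)
--         # If dist to ancestor is j, child will be at distance j+1
--         # We iterate j from 1 to k-1
--         for j in range(1, k):
--             s_max = val
--             s_min = val
--             next_dist = j + 1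
--             # Sum up contributions from all children
--             for c_maxs, c_mins in children_results:
--                 s_max += c_maxs[next_dist]
--                 s_min += c_mins[next_dist]
--             curr_maxs[j] = s_max
--             curr_mins[j] = s_min
--
--         # 2. Fill state where we CAN invert u (distance j == k)
--         # Option A: Don't invert u. Child sees distance k (capped at k).
--         no_inv_max = val
--         no_inv_min = val
--         for c_maxs, c_mins in children_results:
--             no_inv_max += c_maxs[k]
--             no_inv_min += c_mins[k]
--
--         # Option B: Invert u. Child sees distance 1.
--         # If we invert, the values in subtree flip.
--         # Total sum = - ( val + sum(children_sums_at_dist_1) )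
--         # To maximize total, we need to minimize the inner sum.
--         # To minimize total, we need to maximize the inner sum.
--         inv_max = -val
--         inv_min = -val
--         for c_maxs, c_mins in children_results:
--             # maximize -> - (min of child)
--             inv_max += -c_mins[1]
--             # minimize -> - (max of child)
--             inv_min += -c_maxs[1]
--
--         curr_maxs[k] = max(no_inv_max, inv_max)
--         curr_mins[k] = min(no_inv_min, inv_min)
--
--         return curr_maxs, curr_mins
--
--     # Root is effectively at distance infinity >= k from any inverted ancestor
--     root_maxs, _ = dfs(0, -1)
--
--     return root_maxs[k]
-- ===== SOURCE B (Python) =====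
-- from typing import List
--
-- def subtreeInversionSum(edges: List[List[int]], nums: List[int], k: int) -> int:
--     n = len(nums)
--     adj = [[] for _ in range(n)]
--     for u, v in edges:
--         adj[u].append(v)
--         adj[v].append(u)
--
--     # Phase 1: flatten the tree into an explicit post-order list of (node, parent).
--     def post_order(u, p):
--         order = []
--         for v in adj[u]:
--             if v != p:
--                 order.extend(post_order(v, u))
--         order.append((u, p))
--         return order
--
--     K = k + 1
--     # Phase 2: evaluate the DP bottom-up over the post-order list, keeping the
--     # finished (max_sums, min_sums) vectors on an explicit result stack; each
--     # node's children vectors are aggregated componentwise once, then read.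
--     stack = []
--     for u, p in post_order(0, -1):
--         kids = sum(1 for v in adj[u] if v != p)
--         children = stack[len(stack) - kids:]
--         del stack[len(stack) - kids:]
--         agg_max = [0] * K
--         agg_min = [0] * K
--         for cm, cn in children:
--             agg_max = [a + b for a, b in zip(agg_max, cm)]
--             agg_min = [a + b for a, b in zip(agg_min, cn)]
--         val = nums[u]
--         maxs = [0] * K
--         mins = [0] * K
--         for j in range(1, k):
--             maxs[j] = val + agg_max[j + 1]
--             mins[j] = val + agg_min[j + 1]
--         maxs[k] = max(val + agg_max[k], -val - sum(cn[1] for _, cn in children))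
--         mins[k] = min(val + agg_min[k], -val - sum(cm[1] for cm, _ in children))
--         stack.append((maxs, mins))
--     return stack[-1][0][k]
-- ===== Notes on version B (the rewrite author's own statement) =====
-- stated objective: alternative
-- what changed: B replaces A's one-pass recursive DP (each dfs call returning its (max_sums, min_sums) arrays up the call stack, with per-state loops over the children) by a two-phase scheme: it first flattens the tree into an explicit post-order (node, parent) list, then evaluates the DP in a single fold over that list, keeping finished vectors on an explicit result stack and aggregating each node's children vectors componentwise once before the states are filled.
-- outside the precondition, e.g. on subtreeInversionSum([[3, -5]], [-4, 0, -1, -2, 2], 3): A returns 10, B returns 10; on subtreeInversionSum([[0, 1], [-2, 0]], [5, 7], 1): A raises RecursionError, B raises RecursionError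
import Mathlib
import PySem

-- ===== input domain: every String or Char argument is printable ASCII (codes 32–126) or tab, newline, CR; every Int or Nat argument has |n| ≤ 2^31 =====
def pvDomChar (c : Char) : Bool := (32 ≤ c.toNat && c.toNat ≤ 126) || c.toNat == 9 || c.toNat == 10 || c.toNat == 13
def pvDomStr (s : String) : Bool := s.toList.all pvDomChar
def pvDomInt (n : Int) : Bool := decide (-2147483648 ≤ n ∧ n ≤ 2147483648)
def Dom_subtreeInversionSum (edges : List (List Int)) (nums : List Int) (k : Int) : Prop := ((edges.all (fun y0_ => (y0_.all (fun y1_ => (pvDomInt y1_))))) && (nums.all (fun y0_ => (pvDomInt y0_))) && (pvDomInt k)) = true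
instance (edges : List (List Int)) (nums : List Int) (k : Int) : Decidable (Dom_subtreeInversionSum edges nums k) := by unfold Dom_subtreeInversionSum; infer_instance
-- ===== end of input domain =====

-- B replaces A's recursive DP (each call returning its (max,min) vectors) by a two-phase
-- scheme — an explicit post-order (node,parent) list, then a result-stack fold that
-- aggregates the children's vectors componentwise once per node; same cost (objective: alternative).

-- xs[i] (IndexError → default 0; out-of-range reads happen only outside Pre_)
def pvGetI (xs : List Int) (i : Int) : Int := (PySem.List.pyGet? xs i).getD 0

def pvGetL (xs : List (List Int)) (i : Int) : List Int := (PySem.List.pyGet? xs i).getD []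

-- adj[i].append(v): Python list indexing, including negative-index wraparound
def pvAppendAt (adj : List (List Int)) (i : Int) (v : Int) : List (List Int) :=
  let j : Int := if i < 0 then i + adj.length else i
  if 0 ≤ j ∧ j < adj.length then adj.set j.toNat ((adj.getD j.toNat []) ++ [v]) else adj

def pvBuildAdj (n : Nat) (edges : List (List Int)) : List (List Int) :=
  edges.foldl (fun adj e =>
    let u := pvGetI e 0
    let v := pvGetI e 1
    pvAppendAt (pvAppendAt adj u v) v u) (List.replicate n [])

-- ===== PORT A =====

-- the body of A's dfs after the recursive calls: fills curr_maxs/curr_mins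
def pvCombineA (children : List (List Int × List Int)) (val : Int) (k : Int) :
    List Int × List Int :=
  let curr : List Int × List Int :=
    (List.replicate (k + 1).toNat 0, List.replicate (k + 1).toNat 0)
  let curr := (PySem.List.pyRange 1 k 1).foldl (fun (c : List Int × List Int) j =>
      let s := children.foldl
        (fun (s : Int × Int) cr => (s.1 + pvGetI cr.1 (j + 1), s.2 + pvGetI cr.2 (j + 1)))
        (val, val)
      (c.1.set j.toNat s.1, c.2.set j.toNat s.2)) curr
  let noinv := children.foldl
    (fun (s : Int × Int) cr => (s.1 + pvGetI cr.1 k, s.2 + pvGetI cr.2 k)) (val, val)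
  let inv := children.foldl
    (fun (s : Int × Int) cr => (s.1 + -pvGetI cr.2 1, s.2 + -pvGetI cr.1 1)) (-val, -val)
  (curr.1.set k.toNat (max noinv.1 inv.1), curr.2.set k.toNat (min noinv.2 inv.2))

mutual
-- A's recursive dfs(u, p); fuel = recursion-depth budget (none = RecursionError, outside Pre_)
def pvDfsA (adj : List (List Int)) (nums : List Int) (k : Int) :
    Nat → Int → Int → Option (List Int × List Int)
  | 0, _, _ => none
  | Nat.succ f, u, p =>
    (pvDfsAKids adj nums k f ((pvGetL adj u).filter (fun v => v ≠ p)) u).map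
      (fun cs => pvCombineA cs (pvGetI nums u) k)
termination_by f u p => (f, 0)

-- the loop 'for v in adj[u]: if v != p: children_results.append(dfs(v, u))'
def pvDfsAKids (adj : List (List Int)) (nums : List Int) (k : Int) :
    Nat → List Int → Int → Option (List (List Int × List Int))
  | _, [], _ => some []
  | f, v :: vs, u => do
    let r ← pvDfsA adj nums k f v u
    let rs ← pvDfsAKids adj nums k f vs u
    pure (r :: rs)
termination_by f vs u => (f, vs.length + 1)
end

def subtreeInversionSum (edges : List (List Int)) (nums : List Int) (k : Int) : Int :=
  let n := nums.length
  let adj := pvBuildAdj n edges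
  match pvDfsA adj nums k (n + 1) 0 (-1) with
  | none => 0
  | some r => pvGetI r.1 k

-- ===== PORT B =====

mutual
-- B's post_order(u, p): the flattened (node, parent) visit list
def pvPostB (adj : List (List Int)) :
    Nat → Int → Int → Option (List (Int × Int))
  | 0, _, _ => none
  | Nat.succ f, u, p =>
    (pvPostBKids adj f ((pvGetL adj u).filter (fun v => v ≠ p)) u).map
      (fun os => os.flatten ++ [(u, p)])
termination_by f u p => (f, 0)

def pvPostBKids (adj : List (List Int)) :
    Nat → List Int → Int → Option (List (List (Int × Int)))
  | _, [], _ => some []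
  | f, v :: vs, u => do
    let o ← pvPostB adj f v u
    let os ← pvPostBKids adj f vs u
    pure (o :: os)
termination_by f vs u => (f, vs.length + 1)
end

-- B's per-node body: aggregate the children's vectors componentwise for the j-loop and
-- the no-invert option; the invert option sums the children's distance-1 entries directly
def pvCombineB (children : List (List Int × List Int)) (val : Int) (k : Int) :
    List Int × List Int :=
  let K := (k + 1).toNat
  let agg := children.foldl
    (fun (a : List Int × List Int) cr =>
      (List.zipWith (· + ·) a.1 cr.1, List.zipWith (· + ·) a.2 cr.2))
    (List.replicate K 0, List.replicate K 0)
  let ms := (PySem.List.pyRange 1 k 1).foldl (fun (c : List Int × List Int) j =>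
      (c.1.set j.toNat (val + pvGetI agg.1 (j + 1)),
       c.2.set j.toNat (val + pvGetI agg.2 (j + 1))))
    (List.replicate K 0, List.replicate K 0)
  (ms.1.set k.toNat
      (max (val + pvGetI agg.1 k) (-val - (children.map (fun c => pvGetI c.2 1)).sum)),
   ms.2.set k.toNat
      (min (val + pvGetI agg.2 k) (-val - (children.map (fun c => pvGetI c.1 1)).sum)))

-- one iteration of B's 'for u, p in post_order(0, -1)' loop over the result stack
def pvStep (adj : List (List Int)) (nums : List Int) (k : Int)
    (st : List (List Int × List Int)) (e : Int × Int) : List (List Int × List Int) :=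
  let m := ((pvGetL adj e.1).filter (fun v => v ≠ e.2)).length
  let children := st.drop (st.length - m)
  let st' := st.take (st.length - m)
  st' ++ [pvCombineB children (pvGetI nums e.1) k]

def subtreeInversionSum_alt (edges : List (List Int)) (nums : List Int) (k : Int) : Int :=
  let n := nums.length
  let adj := pvBuildAdj n edges
  match pvPostB adj (n + 1) 0 (-1) with
  | none => 0
  | some order =>
    let st := order.foldl (pvStep adj nums k) []
    match st.getLast? with
    | none => 0
    | some r => pvGetI r.1 k

-- ===== PRECONDITION & SPEC =====

-- degree of x in the remaining edge list
def pvDeg (x : Int) (es : List (Int × Int)) : Nat :=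
  es.countP (fun e => e.1 == x || e.2 == x)

-- leaf pruning: a graph is a forest iff repeatedly deleting an edge with a
-- degree-1 endpoint empties the edge list
def pvPrune : Nat → List (Int × Int) → Bool
  | _, [] => true
  | 0, _ :: _ => false
  | Nat.succ f, e :: es =>
    match (e :: es).find? (fun d => pvDeg d.1 (e :: es) == 1 || pvDeg d.2 (e :: es) == 1) with
    | none => false
    | some d => pvPrune f ((e :: es).erase d)

def pvNorm (e : Int × Int) : Int × Int := if e.1 ≤ e.2 then e else (e.2, e.1)

def pvReachStep (pairs : List (Int × Int)) (s : List Int) : List Int :=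
  pairs.foldl (fun s e =>
    if e.1 ∈ s ∧ ¬ e.2 ∈ s then s ++ [e.2]
    else if e.2 ∈ s ∧ ¬ e.1 ∈ s then s ++ [e.1]
    else s) s

-- nodes reachable from 0 (fixpoint is reached within pairs.length rounds)
def pvReach : Nat → List (Int × Int) → List Int → List Int
  | 0, _, s => s
  | Nat.succ f, pairs, s => pvReach f pairs (pvReachStep pairs s)

-- the distinct undirected edges of node 0's connected component form a forest
def pvCompForest (pairs : List (Int × Int)) : Bool :=
  let comp := pvReach pairs.length pairs [0]
  let ces := ((pairs.filter (fun e => e.1 ∈ comp || e.2 ∈ comp)).map pvNorm).dedup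
  pvPrune ces.length ces

-- a raw endpoint as Python's negative indexing resolves it
def pvWrapId (n : Nat) (x : Int) : Int := if x < 0 then x + n else x

def pvPairs (edges : List (List Int)) : List (Int × Int) :=
  edges.map (fun e => (pvGetI e 0, pvGetI e 1))

-- the raw ids adjacent to u: endpoints whose partner's slot is u's slot
def pvNbrsRaw (n : Nat) (pairs : List (Int × Int)) (u : Int) : List Int :=
  pairs.flatMap (fun e =>
    (if pvWrapId n e.1 = pvWrapId n u then [e.2] else []) ++
    (if pvWrapId n e.2 = pvWrapId n u then [e.1] else []))

def pvReachRawStep (n : Nat) (pairs : List (Int × Int)) (s : List Int) : List Int :=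
  s.foldl (fun acc u => (pvNbrsRaw n pairs u).foldl
    (fun acc v => if v ∈ acc then acc else acc ++ [v]) acc) s

-- raw ids reachable from node 0 (fixpoint within 2*pairs.length+1 rounds)
def pvReachRaw : Nat → Nat → List (Int × Int) → List Int → List Int
  | 0, _, _, s => s
  | Nat.succ f, n, pairs, s => pvReachRaw f n pairs (pvReachRawStep n pairs s)

def pvRawIds (edges : List (List Int)) (n : Nat) : List Int :=
  pvReachRaw (2 * edges.length + 1) n (pvPairs edges) [0]

-- Pre_ admits exactly the inputs on which A returns: nonempty nums, edges of two in-range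
-- endpoints, no two raw ids reachable from node 0 aliasing one adjacency slot through
-- negative-index wraparound, node 0's component acyclic, and k ≥ 1 or k = 0 with a
-- childless root.  Outside this A raises (IndexError/ValueError on malformed edges, k < 0
-- or k = 0 with children, RecursionError on a cycle through node 0's component) — except
-- some reachable aliased raw endpoints, excluded because whether A's traversal even
-- terminates there is an accident of the wraparound and its terminating subset has no
-- closed form (where A does terminate there, A and B agree; see the cite).
def Pre_subtreeInversionSum (edges : List (List Int)) (nums : List Int) (k : Int) : Prop :=
  1 ≤ nums.length ∧
  (∀ e ∈ edges, e.length = 2 ∧ -(nums.length : Int) ≤ pvGetI e 0 ∧ pvGetI e 0 < nums.length ∧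
      -(nums.length : Int) ≤ pvGetI e 1 ∧ pvGetI e 1 < nums.length) ∧
  (∀ x ∈ pvRawIds edges nums.length, ∀ y ∈ pvRawIds edges nums.length,
      pvWrapId nums.length x = pvWrapId nums.length y → x = y) ∧
  pvCompForest ((pvPairs edges).map (fun e =>
      (pvWrapId nums.length e.1, pvWrapId nums.length e.2))) = true ∧
  (1 ≤ k ∨ (k = 0 ∧ ∀ e ∈ edges,
      (pvWrapId nums.length (pvGetI e 0) = 0 → pvGetI e 1 = -1) ∧
      (pvWrapId nums.length (pvGetI e 1) = 0 → pvGetI e 0 = -1)))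

instance (edges : List (List Int)) (nums : List Int) (k : Int) :
    Decidable (Pre_subtreeInversionSum edges nums k) := by
  unfold Pre_subtreeInversionSum; infer_instance

def pvWitness_subtreeInversionSum : List (List Int) × List Int × Int :=
  ([[0, 1], [1, 2]], [1, -2, 3], 2)

def Spec_subtreeInversionSum (edges : List (List Int)) (nums : List Int) (k : Int) (out : Int) : Prop := out = subtreeInversionSum_alt edges nums k
instance (edges : List (List Int)) (nums : List Int) (k : Int) (out : Int) : Decidable (Spec_subtreeInversionSum edges nums k out) := by unfold Spec_subtreeInversionSum; infer_instance

-- ===== CLAIM (what is proved, stated in full; the proofs are below) =====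
def Claim_equal_subtreeInversionSum : Prop := ∀ (edges : List (List Int)) (nums : List Int) (k : Int), Dom_subtreeInversionSum edges nums k → Pre_subtreeInversionSum edges nums k → Spec_subtreeInversionSum edges nums k (subtreeInversionSum edges nums k)


-- ===== LEMMAS AND PROOFS =====

theorem pvFoldl_len_inv {α : Type} (g : (List Int × List Int) → α → List Int × List Int)
    (h : ∀ c a, (g c a).1.length = c.1.length ∧ (g c a).2.length = c.2.length) :
    ∀ (l : List α) (c : List Int × List Int),
      (l.foldl g c).1.length = c.1.length ∧ (l.foldl g c).2.length = c.2.length := by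
  intro l
  induction l with
  | nil => intro c; exact ⟨rfl, rfl⟩
  | cons a l ih =>
    intro c
    have := ih (g c a)
    simpa [List.foldl_cons, (h c a).1, (h c a).2] using this

theorem pvGetI_zipAdd (a b : List Int) (h : a.length = b.length) (i : Int) :
    pvGetI (List.zipWith (· + ·) a b) i = pvGetI a i + pvGetI b i := by
  unfold pvGetI
  have hz : (List.zipWith (· + ·) a b).length = a.length := by
    simp [List.length_zipWith, h]
  by_cases hr : PySem.Raise.InRange a.length i
  · have hr' : -(a.length : Int) ≤ i ∧ i < a.length := by
      simpa only [PySem.Raise.InRange] using hr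
    by_cases hi : 0 ≤ i
    · rw [PySem.List.pyGet?_of_nonneg (List.zipWith (· + ·) a b) hi,
        PySem.List.pyGet?_of_nonneg a hi, PySem.List.pyGet?_of_nonneg b hi]
      have ht : i.toNat < a.length := by omega
      rw [List.getElem?_eq_getElem (by omega), List.getElem?_eq_getElem (by omega),
        List.getElem?_eq_getElem (by omega)]
      simp [List.getElem_zipWith]
    · have e : i = -((((-i).toNat : Nat)) : Int) := by omega
      have hk : 0 < (-i).toNat := by omega
      rw [e, PySem.List.pyGet?_neg_natCast (List.zipWith (· + ·) a b) (-i).toNat hk (by omega),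
        PySem.List.pyGet?_neg_natCast a (-i).toNat hk (by omega),
        PySem.List.pyGet?_neg_natCast b (-i).toNat hk (by omega)]
      have h1 : a.length - (-i).toNat < a.length := by omega
      rw [List.getElem?_eq_getElem (by omega), List.getElem?_eq_getElem h1,
        List.getElem?_eq_getElem (by omega)]
      have hbi : b.length - (-i).toNat = a.length - (-i).toNat := by omega
      have hmin : min a.length b.length = a.length := by omega
      simp [List.getElem_zipWith, hbi, hmin]
  · have h1 : PySem.List.pyGet? (List.zipWith (· + ·) a b) i = none := by
      rw [PySem.List.pyGet?_eq_none_iff, hz]; exact hr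
    have h2 : PySem.List.pyGet? a i = none := by
      rw [PySem.List.pyGet?_eq_none_iff]; exact hr
    have h3 : PySem.List.pyGet? b i = none := by
      rw [PySem.List.pyGet?_eq_none_iff, ← h]; exact hr
    simp [h1, h2, h3]


theorem pvGetI_replicate (K : Nat) (i : Int) : pvGetI (List.replicate K (0 : Int)) i = 0 := by
  unfold pvGetI
  cases hg : PySem.List.pyGet? (List.replicate K (0 : Int)) i with
  | none => rfl
  | some x =>
    have hx := PySem.List.mem_of_pyGet?_eq_some _ hg
    simp [List.eq_of_mem_replicate hx]

theorem pvAgg (K : Nat) (i : Int) :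
    ∀ (cs : List (List Int × List Int)),
      (∀ c ∈ cs, c.1.length = K ∧ c.2.length = K) →
      ∀ (a : List Int × List Int), a.1.length = K → a.2.length = K →
      ((cs.foldl (fun (a : List Int × List Int) cr =>
          (List.zipWith (· + ·) a.1 cr.1, List.zipWith (· + ·) a.2 cr.2)) a).1.length = K ∧
       (cs.foldl (fun (a : List Int × List Int) cr =>
          (List.zipWith (· + ·) a.1 cr.1, List.zipWith (· + ·) a.2 cr.2)) a).2.length = K ∧
       pvGetI (cs.foldl (fun (a : List Int × List Int) cr =>
          (List.zipWith (· + ·) a.1 cr.1, List.zipWith (· + ·) a.2 cr.2)) a).1 i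
         = pvGetI a.1 i + (cs.map (fun c => pvGetI c.1 i)).sum ∧
       pvGetI (cs.foldl (fun (a : List Int × List Int) cr =>
          (List.zipWith (· + ·) a.1 cr.1, List.zipWith (· + ·) a.2 cr.2)) a).2 i
         = pvGetI a.2 i + (cs.map (fun c => pvGetI c.2 i)).sum) := by
  intro cs
  induction cs with
  | nil => intro _ a h1 h2; exact ⟨h1, h2, by simp, by simp⟩
  | cons c cs ih =>
    intro hcs a h1 h2
    have hc := hcs c (by simp)
    have hl1 : (List.zipWith (· + ·) a.1 c.1).length = K := by
      simp [List.length_zipWith, h1, hc.1]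
    have hl2 : (List.zipWith (· + ·) a.2 c.2).length = K := by
      simp [List.length_zipWith, h2, hc.2]
    have ihh := ih (fun d hd => hcs d (by simp [hd])) (List.zipWith (· + ·) a.1 c.1, List.zipWith (· + ·) a.2 c.2) hl1 hl2
    refine ⟨ihh.1, ihh.2.1, ?_, ?_⟩
    · rw [List.foldl_cons, ihh.2.2.1, pvGetI_zipAdd a.1 c.1 (by rw [h1, hc.1]) i]
      simp; ring
    · rw [List.foldl_cons, ihh.2.2.2, pvGetI_zipAdd a.2 c.2 (by rw [h2, hc.2]) i]
      simp; ring

-- the invariant tying A's dfs to B's (post-order, stack fold) pair at equal fuel: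
-- they fail together, or succeed together and folding B's order of u's subtree onto any
-- stack pushes exactly A's result for u
def pvRel (adj : List (List Int)) (nums : List Int) (k : Int) (f : Nat) (u p : Int) : Prop :=
  (pvDfsA adj nums k f u p = none ∧ pvPostB adj f u p = none) ∨
  (∃ r o, pvDfsA adj nums k f u p = some r ∧ pvPostB adj f u p = some o ∧
    r.1.length = (k + 1).toNat ∧ r.2.length = (k + 1).toNat ∧
    ∀ st rest, (o ++ rest).foldl (pvStep adj nums k) st
      = rest.foldl (pvStep adj nums k) (st ++ [r]))

def pvRelKids (adj : List (List Int)) (nums : List Int) (k : Int) (f : Nat)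
    (vs : List Int) (u : Int) : Prop :=
  (pvDfsAKids adj nums k f vs u = none ∧ pvPostBKids adj f vs u = none) ∨
  (∃ rs os, pvDfsAKids adj nums k f vs u = some rs ∧ pvPostBKids adj f vs u = some os ∧
    rs.length = vs.length ∧
    (∀ c ∈ rs, c.1.length = (k + 1).toNat ∧ c.2.length = (k + 1).toNat) ∧
    ∀ st rest, (os.flatten ++ rest).foldl (pvStep adj nums k) st
      = rest.foldl (pvStep adj nums k) (st ++ rs))

theorem pvCombineA_len (cs : List (List Int × List Int)) (val k : Int) :
    (pvCombineA cs val k).1.length = (k + 1).toNat ∧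
    (pvCombineA cs val k).2.length = (k + 1).toNat := by
  unfold pvCombineA
  simp only [List.length_set]
  constructor
  · rw [(pvFoldl_len_inv _ (fun c a => ⟨by simp, by simp⟩) _ _).1, List.length_replicate]
  · rw [(pvFoldl_len_inv _ (fun c a => ⟨by simp, by simp⟩) _ _).2, List.length_replicate]

theorem pvSum_neg (l : List (List Int × List Int)) (f : (List Int × List Int) → Int) :
    (l.map (fun x => -f x)).sum = -((l.map f).sum) := by
  induction l with
  | nil => simp
  | cons a l ih => simp [ih]; ring

set_option maxHeartbeats 2000000 in
theorem pvCombine_eq (cs : List (List Int × List Int)) (val k : Int)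
    (h : ∀ c ∈ cs, c.1.length = (k + 1).toNat ∧ c.2.length = (k + 1).toNat) :
    pvCombineA cs val k = pvCombineB cs val k := by
  unfold pvCombineA pvCombineB
  have hrep : (List.replicate (k + 1).toNat (0 : Int)).length = (k + 1).toNat := by simp
  have hagg := fun (i : Int) => pvAgg (k + 1).toNat i cs h
    (List.replicate (k + 1).toNat 0, List.replicate (k + 1).toNat 0) hrep hrep
  have hg1 : ∀ i : Int, pvGetI (cs.foldl (fun (a : List Int × List Int) cr =>
      (List.zipWith (· + ·) a.1 cr.1, List.zipWith (· + ·) a.2 cr.2))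
      (List.replicate (k + 1).toNat 0, List.replicate (k + 1).toNat 0)).1 i
      = (cs.map (fun c => pvGetI c.1 i)).sum := by
    intro i
    rw [(hagg i).2.2.1, pvGetI_replicate, zero_add]
  have hg2 : ∀ i : Int, pvGetI (cs.foldl (fun (a : List Int × List Int) cr =>
      (List.zipWith (· + ·) a.1 cr.1, List.zipWith (· + ·) a.2 cr.2))
      (List.replicate (k + 1).toNat 0, List.replicate (k + 1).toNat 0)).2 i
      = (cs.map (fun c => pvGetI c.2 i)).sum := by
    intro i
    rw [(hagg i).2.2.2, pvGetI_replicate, zero_add]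
  have hsplit : ∀ j : Int, cs.foldl
      (fun (s : Int × Int) cr => (s.1 + pvGetI cr.1 (j + 1), s.2 + pvGetI cr.2 (j + 1)))
      (val, val)
      = (cs.foldl (fun s cr => s + pvGetI cr.1 (j + 1)) val,
         cs.foldl (fun s cr => s + pvGetI cr.2 (j + 1)) val) := fun j =>
    PySem.List.foldl_prod_mk (fun s cr => s + pvGetI cr.1 (j + 1))
      (fun s cr => s + pvGetI cr.2 (j + 1)) cs val val
  have hnoinv : cs.foldl
      (fun (s : Int × Int) cr => (s.1 + pvGetI cr.1 k, s.2 + pvGetI cr.2 k)) (val, val)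
      = (cs.foldl (fun s cr => s + pvGetI cr.1 k) val,
         cs.foldl (fun s cr => s + pvGetI cr.2 k) val) :=
    PySem.List.foldl_prod_mk (fun s cr => s + pvGetI cr.1 k)
      (fun s cr => s + pvGetI cr.2 k) cs val val
  have hinv : cs.foldl
      (fun (s : Int × Int) cr => (s.1 + -pvGetI cr.2 1, s.2 + -pvGetI cr.1 1)) (-val, -val)
      = (cs.foldl (fun s cr => s + -pvGetI cr.2 1) (-val),
         cs.foldl (fun s cr => s + -pvGetI cr.1 1) (-val)) :=
    PySem.List.foldl_prod_mk (fun s cr => s + -pvGetI cr.2 1)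
      (fun s cr => s + -pvGetI cr.1 1) cs (-val) (-val)
  simp only [hsplit, hnoinv, hinv, PySem.List.foldl_add, hg1, hg2, pvSum_neg, sub_eq_add_neg]

theorem pvRelKids_of (adj : List (List Int)) (nums : List Int) (k : Int) (f : Nat)
    (hP : ∀ u p, pvRel adj nums k f u p) :
    ∀ vs u, pvRelKids adj nums k f vs u := by
  intro vs u
  induction vs with
  | nil =>
    refine Or.inr ⟨[], [], by simp [pvDfsAKids], by simp [pvPostBKids], rfl, ?_, ?_⟩
    · intro c hc; cases hc
    · intro st rest; simp
  | cons v vs ih =>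
    rcases hP v u with ⟨h1, h2⟩ | ⟨r, o, h1, h2, hl1, hl2, hfold⟩
    · left
      constructor
      · simp [pvDfsAKids, h1]
      · simp [pvPostBKids, h2]
    · rcases ih with ⟨g1, g2⟩ | ⟨rs, os, g1, g2, glen, glens, gfold⟩
      · left
        constructor
        · simp [pvDfsAKids, h1, g1]
        · simp [pvPostBKids, h2, g2]
      · right
        refine ⟨r :: rs, o :: os, ?_, ?_, ?_, ?_, ?_⟩
        · simp [pvDfsAKids, h1, g1]
        · simp [pvPostBKids, h2, g2]
        · simp [glen]
        · intro c hc
          rcases List.mem_cons.mp hc with hc | hc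
          · rw [hc]; exact ⟨hl1, hl2⟩
          · exact glens c hc
        · intro st rest
          have hx : (o :: os).flatten ++ rest = o ++ (os.flatten ++ rest) := by
            simp [List.flatten_cons, List.append_assoc]
          rw [hx, hfold, gfold]
          simp [List.append_assoc]

theorem pvRel_all (adj : List (List Int)) (nums : List Int) (k : Int) :
    ∀ f u p, pvRel adj nums k f u p := by
  intro f
  induction f with
  | zero =>
    intro u p
    left
    exact ⟨by simp [pvDfsA], by simp [pvPostB]⟩
  | succ f ih =>
    intro u p
    have hk := pvRelKids_of adj nums k f ih
      ((pvGetL adj u).filter (fun v => !decide (v = p))) u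
    rcases hk with ⟨h1, h2⟩ | ⟨rs, os, h1, h2, hlen, hlens, hfold⟩
    · left
      constructor
      · simp [pvDfsA, h1]
      · simp [pvPostB, h2]
    · right
      refine ⟨pvCombineA rs (pvGetI nums u) k, os.flatten ++ [(u, p)],
        by simp [pvDfsA, h1], by simp [pvPostB, h2],
        (pvCombineA_len rs (pvGetI nums u) k).1, (pvCombineA_len rs (pvGetI nums u) k).2, ?_⟩
      intro st rest
      have hx : (os.flatten ++ [(u, p)]) ++ rest = os.flatten ++ ((u, p) :: rest) := by
        simp [List.append_assoc]
      rw [hx, hfold, List.foldl_cons]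
      have hstep : pvStep adj nums k (st ++ rs) (u, p)
          = st ++ [pvCombineA rs (pvGetI nums u) k] := by
        unfold pvStep
        simp only [ne_eq, decide_not]
        have hm : (st ++ rs).length
            - ((pvGetL adj (u, p).1).filter (fun v => !decide (v = (u, p).2))).length
            = st.length := by
          rw [List.length_append, ← hlen]
          omega
        rw [hm, List.drop_left, List.take_left,
          pvCombine_eq rs (pvGetI nums (u, p).1) k hlens]
      rw [hstep]

theorem pv_eq_all (edges : List (List Int)) (nums : List Int) (k : Int) :
    subtreeInversionSum edges nums k = subtreeInversionSum_alt edges nums k := by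
  unfold subtreeInversionSum subtreeInversionSum_alt
  rcases pvRel_all (pvBuildAdj nums.length edges) nums k (nums.length + 1) 0 (-1) with
    ⟨h1, h2⟩ | ⟨r, o, h1, h2, _, _, hfold⟩
  · simp only [h1, h2]
  · simp only [h1, h2]
    have hfe := hfold [] []
    simp only [List.append_nil, List.foldl_nil, List.nil_append] at hfe
    simp only [hfe]
    simp

-- ===== VERDICT (by name: the statement is the Claim_ definition above) =====
theorem subtreeInversionSum_spec : Claim_equal_subtreeInversionSum := by
  intro edges nums k _ _
  unfold Spec_subtreeInversionSum
  exact pv_eq_all edges nums k
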